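-- pv_equiv track=rewrite | github.com/joptimus/fox-replay-system | shared/telemetry/f1_data.py | _apply_lap_anchor
-- ===== SOURCE A (Python) =====
-- def _apply_lap_anchor(
--     sorted_codes: list[str],
--     frame_data_raw: dict,
--     lap_boundaries: dict
-- ) -> list[str]:
--     """
--     Validate leaderboard against Tier 0 lap anchors.
--
--     Tier 0 (Legal Truth): Session.laps.Position - official position at lap completion
--
--     If a driver has just completed a lap, snap them to their official position.
--     This prevents long-term drift if Tier 1-2 data diverges from reality.
--
--     Args:
--         sorted_codes: Current driver order from hysteresis smoother (Tier 3)
--         frame_data_raw: Driver data including current lap number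
--         lap_boundaries: Dict mapping driver_code -> dict of {lap_num: official_position}
--                        Pre-computed during telemetry processing
--
--     Returns:
--         Lap-anchored driver order (snapped to official positions at lap boundaries)
--     """
--     if not sorted_codes:
--         return sorted_codes
--
--     lap_snap_corrections = {}
--
--     for code in sorted_codes:
--         current_lap = frame_data_raw.get(code, {}).get("lap")
--
--         if (code in lap_boundaries and
--             current_lap is not None and
--             current_lap in lap_boundaries[code]):
--             official_position = lap_boundaries[code][current_lap]
--             lap_snap_corrections[code] = official_position
--         else:
--             lap_snap_corrections[code] = None
--
--     has_anchors = any(snap is not None for snap in lap_snap_corrections.values())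
--
--     if not has_anchors:
--         return sorted_codes
--
--     def snap_sort_key(code: str) -> tuple:
--         if lap_snap_corrections[code] is not None:
--             return (0, lap_snap_corrections[code])
--         else:
--             return (1, sorted_codes.index(code))
--
--     sorted_codes = sorted(sorted_codes, key=snap_sort_key)
--     return sorted_codes
-- ===== SOURCE B (Python) =====
-- def _apply_lap_anchor(
--     sorted_codes: list[str],
--     frame_data_raw: dict,
--     lap_boundaries: dict
-- ) -> list[str]:
--     if not sorted_codes:
--         return sorted_codes
--
--     anchored = []      # (official_position, code), in original order
--     unanchored = []    # codes with no applicable anchor, in original order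
--
--     for code in sorted_codes:
--         lap = frame_data_raw.get(code, {}).get("lap")
--         laps = lap_boundaries.get(code)
--         if laps is not None and lap is not None and lap in laps:
--             anchored.append((laps[lap], code))
--         else:
--             unanchored.append(code)
--
--     if not anchored:
--         return sorted_codes
--
--     anchored.sort(key=lambda pc: pc[0])   # stable: ties keep original order
--     return [code for _, code in anchored] + unanchored
-- ===== Notes on version B (the rewrite author's own statement) =====
-- stated objective: alternative
-- what changed: Replaces A's single composite-key sort (with O(n) .index lookups in the key) by a one-pass partition into anchored/unanchored, a stable sort of the anchored pairs by position only, and a concatenation.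
import Mathlib
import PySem

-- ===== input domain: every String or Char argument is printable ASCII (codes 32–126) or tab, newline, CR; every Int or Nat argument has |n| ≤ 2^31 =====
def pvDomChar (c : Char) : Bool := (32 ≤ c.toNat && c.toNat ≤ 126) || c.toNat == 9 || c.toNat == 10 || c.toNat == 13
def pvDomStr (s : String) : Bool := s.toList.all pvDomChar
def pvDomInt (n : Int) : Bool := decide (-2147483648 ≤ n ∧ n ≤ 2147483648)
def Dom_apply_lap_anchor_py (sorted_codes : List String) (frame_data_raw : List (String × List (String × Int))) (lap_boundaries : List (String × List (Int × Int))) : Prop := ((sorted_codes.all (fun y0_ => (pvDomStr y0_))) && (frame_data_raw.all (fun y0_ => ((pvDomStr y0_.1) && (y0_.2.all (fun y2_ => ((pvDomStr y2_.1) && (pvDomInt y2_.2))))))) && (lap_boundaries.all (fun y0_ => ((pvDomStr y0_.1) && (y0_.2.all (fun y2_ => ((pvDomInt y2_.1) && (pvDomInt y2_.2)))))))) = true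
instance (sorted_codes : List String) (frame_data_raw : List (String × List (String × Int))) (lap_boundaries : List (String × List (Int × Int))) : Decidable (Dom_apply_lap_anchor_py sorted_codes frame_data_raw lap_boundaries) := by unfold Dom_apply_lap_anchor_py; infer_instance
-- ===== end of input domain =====

-- ===== PORT A =====
-- B changes the decomposition: one-pass partition + single-key stable sort instead of A's
-- composite-key sort with .index lookups. Equal return values proved for duplicate-free code lists.
-- Argument decoding shared by both ports: the dict-of-dict parameters as PySem.Dicts.
def pvFrameDict (frame_data_raw : List (String × List (String × Int))) : PySem.Dict String (PySem.Dict String Int) :=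
  PySem.Dict.ofList (frame_data_raw.map (fun p => (p.1, PySem.Dict.ofList p.2)))
def pvBoundDict (lap_boundaries : List (String × List (Int × Int))) : PySem.Dict String (PySem.Dict Int Int) :=
  PySem.Dict.ofList (lap_boundaries.map (fun p => (p.1, PySem.Dict.ofList p.2)))

def apply_lap_anchor_py (sorted_codes : List String) (frame_data_raw : List (String × List (String × Int))) (lap_boundaries : List (String × List (Int × Int))) : List String :=
  if sorted_codes = [] then sorted_codes else
  let fd := pvFrameDict frame_data_raw
  let lbD := pvBoundDict lap_boundaries
  -- lap_snap_corrections: code -> Option Int (none = Python None)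
  let corrections : PySem.Dict String (Option Int) :=
    sorted_codes.foldl (fun d code =>
      let current_lap : Option Int := ((fd.get? code).getD PySem.Dict.empty).get? "lap"
      -- 'code in lap_boundaries and current_lap is not None and current_lap in lap_boundaries[code]'
      -- followed by 'lap_boundaries[code][current_lap]': the guarded lookup is exactly get? (some iff the key is in)
      let snap : Option Int :=
        if lbD.contains code ∧ current_lap.isSome then
          ((lbD.get? code).getD PySem.Dict.empty).get? (current_lap.getD 0)
        else none
      d.insert code snap) PySem.Dict.empty
  let has_anchors := corrections.values.any (fun s => s.isSome)
  if !has_anchors then sorted_codes else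
  -- snap_sort_key: (0, official_position) or (1, sorted_codes.index(code)); index always succeeds (code ∈ sorted_codes)
  PySem.List.sorted2 sorted_codes
    (fun code => if ((corrections.get? code).getD none).isSome then (0 : Int) else 1)
    (fun code => ((corrections.get? code).getD none).getD (((PySem.List.index? sorted_codes code).getD 0 : Nat) : Int))

-- ===== PORT B =====
def apply_lap_anchor_py_alt (sorted_codes : List String) (frame_data_raw : List (String × List (String × Int))) (lap_boundaries : List (String × List (Int × Int))) : List String :=
  if sorted_codes = [] then sorted_codes else
  let fd := pvFrameDict frame_data_raw
  let lbD := pvBoundDict lap_boundaries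
  let st := sorted_codes.foldl (fun (st : List (Int × String) × List String) code =>
      let lap : Option Int := ((fd.get? code).getD PySem.Dict.empty).get? "lap"
      match lbD.get? code with
      | some laps =>
        match lap with
        | some l =>
          match laps.get? l with
          | some p => (st.1 ++ [(p, code)], st.2)
          | none => (st.1, st.2 ++ [code])
        | none => (st.1, st.2 ++ [code])
      | none => (st.1, st.2 ++ [code])) ([], [])
  if st.1 = [] then sorted_codes
  else ((PySem.List.sorted st.1 (fun pc => pc.1)).map (fun pc => pc.2)) ++ st.2

-- ===== PRECONDITION & SPEC =====
-- Pre_ excludes lists with duplicate driver codes: there A's .index-based tie key regroups a later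
-- duplicate of an unanchored code next to its first occurrence, an accidental order neither
-- implementation would be specified to produce (B keeps the original order of unanchored codes).
def Pre_apply_lap_anchor_py (sorted_codes : List String) (frame_data_raw : List (String × List (String × Int))) (lap_boundaries : List (String × List (Int × Int))) : Prop :=
  sorted_codes.Nodup
instance (sorted_codes : List String) (frame_data_raw : List (String × List (String × Int))) (lap_boundaries : List (String × List (Int × Int))) : Decidable (Pre_apply_lap_anchor_py sorted_codes frame_data_raw lap_boundaries) := by unfold Pre_apply_lap_anchor_py; infer_instance

def pvWitness_apply_lap_anchor_py : List String × (List (String × List (String × Int))) × (List (String × List (Int × Int))) :=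
  (["VER", "HAM"], [("VER", [("lap", 3)])], [("VER", [(3, 1)])])

def Spec_apply_lap_anchor_py (sorted_codes : List String) (frame_data_raw : List (String × List (String × Int))) (lap_boundaries : List (String × List (Int × Int))) (out : List String) : Prop := out = apply_lap_anchor_py_alt sorted_codes frame_data_raw lap_boundaries
instance (sorted_codes : List String) (frame_data_raw : List (String × List (String × Int))) (lap_boundaries : List (String × List (Int × Int))) (out : List String) : Decidable (Spec_apply_lap_anchor_py sorted_codes frame_data_raw lap_boundaries out) := by unfold Spec_apply_lap_anchor_py; infer_instance

-- ===== CLAIM (what is proved, stated in full; the proofs are below) =====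
def Claim_equal_apply_lap_anchor_py : Prop := ∀ (sorted_codes : List String) (frame_data_raw : List (String × List (String × Int))) (lap_boundaries : List (String × List (Int × Int))), Dom_apply_lap_anchor_py sorted_codes frame_data_raw lap_boundaries → Pre_apply_lap_anchor_py sorted_codes frame_data_raw lap_boundaries → Spec_apply_lap_anchor_py sorted_codes frame_data_raw lap_boundaries (apply_lap_anchor_py sorted_codes frame_data_raw lap_boundaries)

-- ===== LEMMAS AND PROOFS =====

-- The anchor a code receives (some official position, or none), common semantic core of both ports.
def pvAnchor (fd : PySem.Dict String (PySem.Dict String Int)) (lbD : PySem.Dict String (PySem.Dict Int Int)) (code : String) : Option Int :=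
  match lbD.get? code with
  | some laps =>
    match ((fd.get? code).getD PySem.Dict.empty).get? "lap" with
    | some l => laps.get? l
    | none => none
  | none => none

-- A's per-code snap value is pvAnchor.
lemma pvSnap_eq_anchor (fd : PySem.Dict String (PySem.Dict String Int)) (lbD : PySem.Dict String (PySem.Dict Int Int)) (code : String) :
    (if lbD.contains code ∧ (((fd.get? code).getD PySem.Dict.empty).get? "lap").isSome then
      ((lbD.get? code).getD PySem.Dict.empty).get? ((((fd.get? code).getD PySem.Dict.empty).get? "lap").getD 0)
    else none) = pvAnchor fd lbD code := by
  simp only [pvAnchor]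
  rcases hl : lbD.get? code with _ | laps <;>
    rcases hf : ((fd.get? code).getD PySem.Dict.empty).get? "lap" with _ | l <;>
    simp [PySem.Dict.contains_eq_isSome_get?, hl]

-- B's loop step, expressed through pvAnchor.
lemma pvStepB (fd : PySem.Dict String (PySem.Dict String Int)) (lbD : PySem.Dict String (PySem.Dict Int Int))
    (st : List (Int × String) × List String) (code : String) :
    (match lbD.get? code with
      | some laps =>
        match ((fd.get? code).getD PySem.Dict.empty).get? "lap" with
        | some l =>
          match laps.get? l with
          | some p => (st.1 ++ [(p, code)], st.2)
          | none => (st.1, st.2 ++ [code])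
        | none => (st.1, st.2 ++ [code])
      | none => (st.1, st.2 ++ [code])) =
    (match pvAnchor fd lbD code with
      | some p => (st.1 ++ [(p, code)], st.2)
      | none => (st.1, st.2 ++ [code])) := by
  simp only [pvAnchor]
  rcases hl : lbD.get? code with _ | laps <;>
    rcases hf : ((fd.get? code).getD PySem.Dict.empty).get? "lap" with _ | l <;> simp

-- B's partition loop, characterised by filters.
lemma pvFoldB (fd : PySem.Dict String (PySem.Dict String Int)) (lbD : PySem.Dict String (PySem.Dict Int Int)) :
    ∀ (xs : List String) (st : List (Int × String) × List String),
    xs.foldl (fun (st : List (Int × String) × List String) code =>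
      match lbD.get? code with
      | some laps =>
        match ((fd.get? code).getD PySem.Dict.empty).get? "lap" with
        | some l =>
          match laps.get? l with
          | some p => (st.1 ++ [(p, code)], st.2)
          | none => (st.1, st.2 ++ [code])
        | none => (st.1, st.2 ++ [code])
      | none => (st.1, st.2 ++ [code])) st =
    (st.1 ++ (xs.filter (fun c => (pvAnchor fd lbD c).isSome)).map (fun c => ((pvAnchor fd lbD c).getD 0, c)),
     st.2 ++ xs.filter (fun c => (pvAnchor fd lbD c).isSome = false)) := by
  intro xs
  induction xs with
  | nil => intro st; simp
  | cons y ys ih =>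
    intro st
    rw [List.foldl_cons, pvStepB fd lbD st y]
    rcases hy : pvAnchor fd lbD y with _ | p <;>
      simp [ih, hy]


lemma pvInsertBy_append {α : Type} (bf : α → α → Bool) (x : α) (l t : List α)
    (h : ∀ u ∈ t, bf x u = true) :
    PySem.List.insertBy bf x (l ++ t) = PySem.List.insertBy bf x l ++ t := by
  induction l with
  | nil =>
    cases t with
    | nil => rfl
    | cons u us => simp [PySem.List.insertBy, h u (by simp)]
  | cons y ys ih =>
    simp only [List.cons_append, PySem.List.insertBy]
    split
    · rfl
    · simp [ih]

lemma pvInsertBy_congr {α : Type} (bf bf' : α → α → Bool) (x : α) (l : List α)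
    (h : ∀ b ∈ l, bf x b = bf' x b) :
    PySem.List.insertBy bf x l = PySem.List.insertBy bf' x l := by
  induction l with
  | nil => rfl
  | cons y ys ih =>
    simp only [PySem.List.insertBy, h y (by simp)]
    split
    · rfl
    · simp [ih (fun b hb => h b (by simp [hb]))]

lemma pvInsertBy_map {α β : Type} (bf : β → β → Bool) (f : α → β) (x : α) (l : List α) :
    PySem.List.insertBy bf (f x) (l.map f) = (PySem.List.insertBy (fun a b => bf (f a) (f b)) x l).map f := by
  induction l with
  | nil => rfl
  | cons y ys ih =>
    simp only [List.map_cons, PySem.List.insertBy]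
    split
    · simp
    · simp [ih]

-- foldl-insertBy congruence: only comparisons between elements of the input and the accumulator matter
lemma pvFoldlInsertBy_congr {α : Type} (bf bf' : α → α → Bool) :
    ∀ (xs acc : List α), (∀ x ∈ xs, ∀ b, (b ∈ acc ∨ b ∈ xs) → bf x b = bf' x b) →
    xs.foldl (fun a x => PySem.List.insertBy bf x a) acc = xs.foldl (fun a x => PySem.List.insertBy bf' x a) acc := by
  intro xs
  induction xs with
  | nil => intro acc _; rfl
  | cons y ys ih =>
    intro acc h
    simp only [List.foldl_cons]
    rw [pvInsertBy_congr bf bf' y acc (fun b hb => h y (by simp) b (Or.inl hb))]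
    exact ih _ (fun x hx b hb => h x (by simp [hx])
      b (by rcases hb with hb | hb
            · rcases (PySem.List.mem_insertBy _ _ _ _).mp hb with h' | h' <;> simp [h']
            · simp [hb]))

lemma pvSorted_congr {α : Type} (xs : List α) (k k' : α → Int) (h : ∀ a ∈ xs, k a = k' a) :
    PySem.List.sorted xs k = PySem.List.sorted xs k' := by
  rw [PySem.List.sorted_eq_foldl_insertBy, PySem.List.sorted_eq_foldl_insertBy]
  exact pvFoldlInsertBy_congr _ _ xs [] (by
    intro x hx b hb
    rcases hb with hb | hb
    · simp at hb
    · simp [h x hx, h b hb])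

lemma pvSorted2_congr {α : Type} (xs : List α) (k1 k1' k2 k2' : α → Int)
    (h1 : ∀ a ∈ xs, k1 a = k1' a) (h2 : ∀ a ∈ xs, k2 a = k2' a) :
    PySem.List.sorted2 xs k1 k2 = PySem.List.sorted2 xs k1' k2' := by
  simp only [PySem.List.sorted2, Bool.false_eq_true, if_false]
  exact pvFoldlInsertBy_congr _ _ xs [] (by
    intro x hx b hb
    rcases hb with hb | hb
    · simp at hb
    · simp [h1 x hx, h1 b hb, h2 x hx, h2 b hb])

lemma pvSorted_map {α β : Type} (l : List α) (f : α → β) (key : β → Int) :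
    PySem.List.sorted (l.map f) key = (PySem.List.sorted l (fun a => key (f a))).map f := by
  rw [PySem.List.sorted_eq_foldl_insertBy, PySem.List.sorted_eq_foldl_insertBy]
  induction l using List.reverseRecOn with
  | nil => rfl
  | append_singleton ys x ih =>
    simp only [List.map_append, List.map_cons, List.map_nil, List.foldl_append, List.foldl_cons, List.foldl_nil]
    rw [ih, pvInsertBy_map]

-- for a member, the (always successful) index lookup is idxOf
lemma pvIdxGetD {α : Type} [BEq α] [LawfulBEq α] (xs : List α) (a : α) (h : a ∈ xs) :
    (PySem.List.index? xs a).getD 0 = List.idxOf a xs := by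
  rw [PySem.List.index?_eq_idxOf?]
  cases hx : List.idxOf? a xs
  · simp_all [List.idxOf?_eq_none_iff]
  · simp [List.idxOf_eq_getD_idxOf?, hx]

-- indices of distinct elements are strictly increasing along the list
lemma pvIdx_pairwise {α : Type} [BEq α] [LawfulBEq α] (xs : List α) (h : xs.Nodup) :
    xs.Pairwise (fun a b => ((PySem.List.index? xs a).getD 0 : Nat) < (PySem.List.index? xs b).getD 0) := by
  rw [List.pairwise_iff_getElem]
  intro i j hi hj hij
  rw [pvIdxGetD _ _ (List.getElem_mem hi), pvIdxGetD _ _ (List.getElem_mem hj),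
    List.Nodup.idxOf_getElem h i hi, List.Nodup.idxOf_getElem h j hj]
  exact hij

lemma pvSorted_append_singleton {α : Type} (l : List α) (key : α → Int) (x : α) :
    PySem.List.sorted (l ++ [x]) key = PySem.List.insertBy (fun a b => decide (key a < key b)) x (PySem.List.sorted l key) := by
  rw [PySem.List.sorted_eq_foldl_insertBy, List.foldl_append, List.foldl_cons, List.foldl_nil,
    ← PySem.List.sorted_eq_foldl_insertBy]

lemma pvSorted2_partition {α : Type} (xs : List α) (k1 k2 : α → Int)
    (h01 : ∀ c ∈ xs, k1 c = 0 ∨ k1 c = 1)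
    (hinc : (xs.filter (fun c => k1 c == 1)).Pairwise (fun a b => k2 a < k2 b)) :
    PySem.List.sorted2 xs k1 k2 = PySem.List.sorted (xs.filter (fun c => k1 c == 0)) k2 ++ xs.filter (fun c => k1 c == 1) := by
  induction xs using List.reverseRecOn with
  | nil => rfl
  | append_singleton ys x ih =>
    have h01' : ∀ c ∈ ys, k1 c = 0 ∨ k1 c = 1 := fun c hc => h01 c (by simp [hc])
    rw [List.filter_append] at hinc
    have hinc' : (ys.filter (fun c => k1 c == 1)).Pairwise (fun a b => k2 a < k2 b) :=
      hinc.sublist (List.sublist_append_left _ _)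
    have hmain := ih h01' hinc'
    have hlhs : PySem.List.sorted2 (ys ++ [x]) k1 k2 =
        PySem.List.insertBy (fun a b => decide (k1 a < k1 b) || (!decide (k1 b < k1 a) && decide (k2 a < k2 b))) x
          (PySem.List.sorted2 ys k1 k2) := by
      simp [PySem.List.sorted2, List.foldl_append]
    rcases h01 x (by simp) with hx | hx
    · -- anchored element: goes into the sorted front block
      rw [List.filter_append, List.filter_append]
      have hfx0 : [x].filter (fun c => k1 c == 0) = [x] := by simp [hx]
      have hfx1 : [x].filter (fun c => k1 c == 1) = [] := by simp [hx]
      rw [hfx0, hfx1, List.append_nil]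
      rw [hlhs, hmain]
      rw [pvInsertBy_append _ _ _ _ (by
        intro u hu
        have hu1 : k1 u = 1 := by simpa using (List.mem_filter.mp hu).2
        simp [hx, hu1])]
      rw [pvInsertBy_congr _ (fun a b => decide (k2 a < k2 b)) x _ (by
        intro b hb
        have hb0 : k1 b = 0 := by
          have := (PySem.List.mem_sorted _ _ _ _).mp hb
          simpa using (List.mem_filter.mp this).2
        simp [hx, hb0])]
      rw [pvSorted_append_singleton]
    · -- unanchored element: appended at the very end
      rw [List.filter_append, List.filter_append]
      have hfx0 : [x].filter (fun c => k1 c == 0) = [] := by simp [hx]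
      have hfx1 : [x].filter (fun c => k1 c == 1) = [x] := by simp [hx]
      rw [hfx0, hfx1, List.append_nil]
      rw [hlhs, hmain]
      rw [List.pairwise_append] at hinc
      rw [PySem.List.insertBy_of_forall_not_before _ _ _ (by
        intro u hu
        rcases List.mem_append.mp hu with hu0 | hu1
        · have : k1 u = 0 := by
            have := (PySem.List.mem_sorted _ _ _ _).mp hu0
            simpa using (List.mem_filter.mp this).2
          simp [hx, this]
        · have h1 : k1 u = 1 := by simpa using (List.mem_filter.mp hu1).2
          have hlt : k2 u < k2 x := hinc.2.2 u hu1 x (by simp [hx])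
          simp [hx, h1, not_lt.mpr (le_of_lt hlt)])]
      simp

-- ===== VERDICT (by name: the statement is the Claim_ definition above) =====
theorem apply_lap_anchor_py_spec : Claim_equal_apply_lap_anchor_py := by
  intro sc fdr lb _ hnd
  unfold Spec_apply_lap_anchor_py
  by_cases hsc : sc = []
  · simp [apply_lap_anchor_py, apply_lap_anchor_py_alt, hsc]
  · simp only [apply_lap_anchor_py, apply_lap_anchor_py_alt, if_neg hsc]
    rw [pvFoldB (pvFrameDict fdr) (pvBoundDict lb) sc ([], [])]
    simp only [pvSnap_eq_anchor, List.nil_append]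
    unfold Pre_apply_lap_anchor_py at hnd
    -- the corrections dict, characterised
    have hitems : (List.foldl (fun d code => d.insert code (pvAnchor (pvFrameDict fdr) (pvBoundDict lb) code)) PySem.Dict.empty sc).items
        = sc.map (fun a => (a, pvAnchor (pvFrameDict fdr) (pvBoundDict lb) a)) := by
      have := PySem.Dict.items_foldl_insert_fresh sc (fun c => c)
        (fun c => pvAnchor (pvFrameDict fdr) (pvBoundDict lb) c) PySem.Dict.empty
        (by simp) (by simpa using hnd)
      simpa using this
    have hkeys : (List.foldl (fun d code => d.insert code (pvAnchor (pvFrameDict fdr) (pvBoundDict lb) code)) PySem.Dict.empty sc).keys.Nodup :=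
      PySem.Dict.nodup_keys_foldl_insert sc (fun _ c => pvAnchor (pvFrameDict fdr) (pvBoundDict lb) c) PySem.Dict.empty (by simp)
    have hget : ∀ c ∈ sc, (List.foldl (fun d code => d.insert code (pvAnchor (pvFrameDict fdr) (pvBoundDict lb) code)) PySem.Dict.empty sc).get? c
        = some (pvAnchor (pvFrameDict fdr) (pvBoundDict lb) c) := by
      intro c hc
      exact PySem.Dict.get?_of_mem_items _ (by rw [hitems]; exact List.mem_map_of_mem hc) hkeys
    have hvals : (List.foldl (fun d code => d.insert code (pvAnchor (pvFrameDict fdr) (pvBoundDict lb) code)) PySem.Dict.empty sc).values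
        = sc.map (fun a => pvAnchor (pvFrameDict fdr) (pvBoundDict lb) a) := by
      simp only [PySem.Dict.values, hitems, List.map_map]
      rfl
    by_cases hne : sc.filter (fun c => (pvAnchor (pvFrameDict fdr) (pvBoundDict lb) c).isSome) = []
    · -- no anchors: both return sorted_codes unchanged
      have hanyF : ((List.foldl (fun d code => d.insert code (pvAnchor (pvFrameDict fdr) (pvBoundDict lb) code)) PySem.Dict.empty sc).values.any (fun s => s.isSome)) = false := by
        rw [hvals, List.any_map, List.any_eq_false]
        intro c hc
        simpa using (List.filter_eq_nil_iff.mp hne) c hc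
      simp [hanyF, hne]
    · -- at least one anchor: both sort
      have hex : ∃ c ∈ sc, (pvAnchor (pvFrameDict fdr) (pvBoundDict lb) c).isSome := by
        rcases List.exists_mem_of_ne_nil _ hne with ⟨c, hc⟩
        exact ⟨c, (List.mem_filter.mp hc).1, (List.mem_filter.mp hc).2⟩
      have hanyT : ((List.foldl (fun d code => d.insert code (pvAnchor (pvFrameDict fdr) (pvBoundDict lb) code)) PySem.Dict.empty sc).values.any (fun s => s.isSome)) = true := by
        rw [hvals, List.any_map, List.any_eq_true]
        rcases hex with ⟨c, hc, h⟩
        exact ⟨c, hc, h⟩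
      have hmapne : (sc.filter (fun c => (pvAnchor (pvFrameDict fdr) (pvBoundDict lb) c).isSome)).map (fun c => ((pvAnchor (pvFrameDict fdr) (pvBoundDict lb) c).getD 0, c)) ≠ [] := by
        simpa using hne
      rw [hanyT]
      simp only [Bool.not_true, Bool.false_eq_true, if_false, if_neg hmapne]
      -- switch A's keys to their pvAnchor form
      rw [pvSorted2_congr sc _
        (fun c => if (pvAnchor (pvFrameDict fdr) (pvBoundDict lb) c).isSome then (0 : Int) else 1) _
        (fun c => (pvAnchor (pvFrameDict fdr) (pvBoundDict lb) c).getD (((PySem.List.index? sc c).getD 0 : Nat) : Int))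
        (by intro a ha; simp [hget a ha]) (by intro a ha; simp [hget a ha])]
      -- partition the stable composite-key sort
      rw [pvSorted2_partition sc _ _ (by intro c _; by_cases h : (pvAnchor (pvFrameDict fdr) (pvBoundDict lb) c).isSome <;> simp [h])
        (by
          rw [List.filter_congr (p := fun c => ((if (pvAnchor (pvFrameDict fdr) (pvBoundDict lb) c).isSome then (0:Int) else 1) == 1)) (q := fun c => decide ((pvAnchor (pvFrameDict fdr) (pvBoundDict lb) c).isSome = false))
            (by intro c _; by_cases h : (pvAnchor (pvFrameDict fdr) (pvBoundDict lb) c).isSome <;> simp [h])]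
          refine ((pvIdx_pairwise sc hnd).sublist List.filter_sublist).imp_of_mem ?_
          intro a b ha hb hab
          have hA : pvAnchor (pvFrameDict fdr) (pvBoundDict lb) a = none := by
            simpa [Option.not_isSome_iff_eq_none] using (List.mem_filter.mp ha).2
          have hB : pvAnchor (pvFrameDict fdr) (pvBoundDict lb) b = none := by
            simpa [Option.not_isSome_iff_eq_none] using (List.mem_filter.mp hb).2
          simp only [hA, hB, Option.getD_none]
          exact_mod_cast hab)]
      -- align the three pieces
      rw [List.filter_congr (p := fun c => ((if (pvAnchor (pvFrameDict fdr) (pvBoundDict lb) c).isSome then (0:Int) else 1) == 1)) (q := fun c => decide ((pvAnchor (pvFrameDict fdr) (pvBoundDict lb) c).isSome = false))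
        (by intro c _; by_cases h : (pvAnchor (pvFrameDict fdr) (pvBoundDict lb) c).isSome <;> simp [h])]
      rw [List.filter_congr (p := fun c => ((if (pvAnchor (pvFrameDict fdr) (pvBoundDict lb) c).isSome then (0:Int) else 1) == 0)) (q := fun c => (pvAnchor (pvFrameDict fdr) (pvBoundDict lb) c).isSome)
        (by intro c _; by_cases h : (pvAnchor (pvFrameDict fdr) (pvBoundDict lb) c).isSome <;> simp [h])]
      rw [pvSorted_map]
      rw [List.map_map]
      have : ((fun pc : Int × String => pc.2) ∘ (fun c => ((pvAnchor (pvFrameDict fdr) (pvBoundDict lb) c).getD 0, c))) = id := rfl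
      rw [this, List.map_id]
      congr 1
      exact pvSorted_congr _ _ _ (by
        intro a ha
        rcases Option.isSome_iff_exists.mp (by simpa using (List.mem_filter.mp ha).2) with ⟨p, hp⟩
        simp [hp])
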